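-- pv_equiv track=rewrite | github.com/LEESUSUSUSU/zero_Project | 제로베이스 수업자료/제로-베이스---데이터-사이언스-스쿨---강의자료---part-11---15--230120-/Part 15. 부록 (코딩 테스트)/코드/코드 - Chapter 05. 알고리즘_기초 알고리즘/5. 탐욕 알고리즘/03_sol.py | solution
-- ===== SOURCE A (Python) =====
-- def solution(num):
--     digits = list(map(int, list(str(num))))
--
--     inc_ind = -1
--     for i in range(1, len(digits)):
--         if digits[i] > digits[i-1]:
--             inc_ind = i
--             break
--
--     if inc_ind == -1:
--         return num
--
--     max_val = digits[inc_ind]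
--     max_ind = inc_ind
--     for i in range(inc_ind + 1, len(digits)):
--         if digits[i] >= max_val:
--             max_val = digits[i]
--             max_ind = i
--
--     for i in range(inc_ind):
--         if digits[i] < max_val:
--             digits[max_ind], digits[i] = digits[i], digits[max_ind]
--             return int(''.join(map(str, digits)))
-- ===== SOURCE B (Python) =====
-- def solution(num):
--     digits = list(map(int, list(str(num))))
--     last = [-1] * 10
--     for i, d in enumerate(digits):
--         last[d] = i
--     for i, d in enumerate(digits):
--         for c in range(9, d, -1):
--             if last[c] > i:
--                 j = last[c]
--                 digits[i], digits[j] = digits[j], digits[i]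
--                 return int(''.join(map(str, digits)))
--     return num
-- ===== Notes on version B (the rewrite author's own statement) =====
-- stated objective: alternative
-- what changed: A's three scans (find first ascent, rescan suffix for the last maximum, rescan prefix for the swap position) are replaced by a length-10 last-occurrence digit table plus a single left-to-right pass that picks the largest later-occurring digit (textbook maximum-swap).
import Mathlib
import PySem

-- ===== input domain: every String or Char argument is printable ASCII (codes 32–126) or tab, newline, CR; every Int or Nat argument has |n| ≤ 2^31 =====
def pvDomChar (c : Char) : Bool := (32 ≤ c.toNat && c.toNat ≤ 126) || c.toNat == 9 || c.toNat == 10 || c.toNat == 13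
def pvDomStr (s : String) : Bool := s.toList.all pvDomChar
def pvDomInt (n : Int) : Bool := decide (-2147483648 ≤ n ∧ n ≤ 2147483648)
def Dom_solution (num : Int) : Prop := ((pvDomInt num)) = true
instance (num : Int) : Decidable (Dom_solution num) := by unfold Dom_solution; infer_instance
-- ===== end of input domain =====

-- B replaces A's three scans (find first ascent, suffix max, prefix rescan) by a last-occurrence
-- digit table plus one left-to-right pass (objective: alternative decomposition, same O(n) cost).

-- shared by both ports: digits = list(map(int, list(str(num)))) — none = ValueError (num < 0)
def pyDigits (num : Int) : Option (List Int) :=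
  (PySem.Int.toChars num).mapM (fun c => PySem.Int.ofChars? [c])

-- shared by both ports: int(''.join(map(str, digits)))
def joinInt (ds : List Int) : Option Int :=
  PySem.Int.ofChars? ((ds.map PySem.Int.toChars).flatten)

-- ===== PORT A =====

-- for i in range(1, len(digits)): if digits[i] > digits[i-1]: inc_ind = i; break
def aFindInc (ds : List Int) (i : Nat) : Int :=
  if i < ds.length then
    if ds.getD i 0 > ds.getD (i-1) 0 then (i : Int) else aFindInc ds (i+1)
  else -1
termination_by ds.length - i

-- for i in range(inc_ind+1, len(digits)): if digits[i] >= max_val: update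
def aMaxScan (ds : List Int) (i : Nat) (mv : Int) (mi : Nat) : Int × Nat :=
  if i < ds.length then
    if ds.getD i 0 ≥ mv then aMaxScan ds (i+1) (ds.getD i 0) i
    else aMaxScan ds (i+1) mv mi
  else (mv, mi)
termination_by ds.length - i

-- digits[max_ind], digits[i] = digits[i], digits[max_ind]
def aSwap (ds : List Int) (mi i : Nat) : List Int :=
  let a := ds.getD i 0
  let b := ds.getD mi 0
  (ds.set mi a).set i b

-- for i in range(inc_ind): if digits[i] < max_val: swap and return; falling off = Python None
def aPrefix (ds : List Int) (inc : Nat) (mv : Int) (mi : Nat) (i : Nat) : Option (List Int) :=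
  if i < inc then
    if ds.getD i 0 < mv then some (aSwap ds mi i)
    else aPrefix ds inc mv mi (i+1)
  else none
termination_by inc - i

def solution (num : Int) : Option Int :=
  match pyDigits num with
  | none => none            -- ValueError
  | some ds =>
    let inc := aFindInc ds 1
    if inc = -1 then some num
    else
      let k := inc.toNat
      let mm := aMaxScan ds (k+1) (ds.getD k 0) k
      match aPrefix ds k mm.1 mm.2 0 with
      | some ds2 => joinInt ds2
      | none => none        -- Python falls off the end: returns None

-- ===== PORT B =====

-- last = [-1]*10; for i, d in enumerate(digits): last[d] = i
def bLast (ds : List Int) : List Int :=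
  (PySem.List.enumerate ds 0).foldl
    (fun last p => PySem.List.pySetD last p.2 p.1) (List.replicate 10 (-1))

-- for c in range(9, d, -1): if last[c] > i: return c   (counter argument runs 9,8,…)
def bInner (last : List Int) (d : Int) (i : Nat) : Nat → Option Nat
  | 0 => none
  | c+1 =>
    if ((c : Int) + 1) ≤ d then none
    else if last.getD (c+1) (-1) > (i : Int) then some (c+1)
    else bInner last d i c

-- digits[i], digits[j] = digits[j], digits[i]
def bSwap (ds : List Int) (i j : Nat) : List Int :=
  let a := ds.getD j 0
  let b := ds.getD i 0
  (ds.set i a).set j b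

-- for i, d in enumerate(digits): inner loop; first hit returns (i, c)
def bScan (ds : List Int) (last : List Int) (i : Nat) : Option (Nat × Nat) :=
  if i < ds.length then
    match bInner last (ds.getD i 0) i 9 with
    | some c => some (i, c)
    | none => bScan ds last (i+1)
  else none
termination_by ds.length - i

def solution_alt (num : Int) : Option Int :=
  match pyDigits num with
  | none => none            -- ValueError
  | some ds =>
    let last := bLast ds
    match bScan ds last 0 with
    | some ic =>
      let j := (last.getD ic.2 (-1)).toNat
      joinInt (bSwap ds ic.1 j)
    | none => some num

-- ===== PRECONDITION & SPEC =====
-- Pre_ excludes num < 0, where Python's int('-') raises ValueError in both A and B.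
def Pre_solution (num : Int) : Prop := 0 ≤ num
instance (num : Int) : Decidable (Pre_solution num) := by unfold Pre_solution; infer_instance

def pvWitness_solution : Int := (2736)

def Spec_solution (num : Int) (out : Option Int) : Prop := out = solution_alt num
instance (num : Int) (out : Option Int) : Decidable (Spec_solution num out) := by unfold Spec_solution; infer_instance

-- ===== CLAIM (what is proved, stated in full; the proofs are below) =====
def Claim_equal_solution : Prop := ∀ (num : Int), Dom_solution num → Pre_solution num → Spec_solution num (solution num)

-- ===== LEMMAS AND PROOFS =====

-- a char whose one-char int() parse is a digit value 0..9
def digOK (c : Char) : Bool :=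
  match PySem.Int.ofChars? [c] with
  | some d => decide (0 ≤ d ∧ d ≤ 9)
  | none => false

lemma digitChar_ok (k : Nat) (hk : k < 10) : digOK (Nat.digitChar k) = true := by
  interval_cases k <;> decide

lemma toDigitsCore_ok : ∀ (fuel n : Nat) (acc : List Char),
    (∀ c ∈ acc, digOK c = true) → ∀ c ∈ Nat.toDigitsCore 10 fuel n acc, digOK c = true := by
  intro fuel
  induction fuel with
  | zero => intro n acc hacc c hc; simp [Nat.toDigitsCore] at hc; exact hacc c hc
  | succ f ih =>
    intro n acc hacc c hc
    rw [Nat.toDigitsCore] at hc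
    by_cases h : n / 10 = 0
    · simp only [h, if_pos rfl] at hc
      rcases List.mem_cons.mp hc with h' | h'
      · subst h'; exact digitChar_ok _ (Nat.mod_lt _ (by norm_num))
      · exact hacc c h'
    · simp only [if_neg h] at hc
      exact ih (n/10) _ (by
        intro c' hc'
        rcases List.mem_cons.mp hc' with h' | h'
        · subst h'; exact digitChar_ok _ (Nat.mod_lt _ (by norm_num))
        · exact hacc c' h') c hc

lemma toChars_ok (num : Int) (h : 0 ≤ num) : ∀ c ∈ PySem.Int.toChars num, digOK c = true := by
  intro c hc
  rw [PySem.Int.toChars, if_neg (by omega)] at hc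
  exact toDigitsCore_ok _ _ _ (by simp) c hc

lemma mapM_digits (cs : List Char) (h : ∀ c ∈ cs, digOK c = true) :
    ∃ ds, cs.mapM (fun c => PySem.Int.ofChars? [c]) = some ds ∧ ∀ d ∈ ds, 0 ≤ d ∧ d ≤ 9 := by
  induction cs with
  | nil => exact ⟨[], by simp, by simp⟩
  | cons c cs ih =>
    obtain ⟨ds, hds, hb⟩ := ih (fun c' hc' => h c' (List.mem_cons_of_mem _ hc'))
    have hc := h c (List.mem_cons_self ..)
    unfold digOK at hc
    rcases he : PySem.Int.ofChars? [c] with _ | d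
    · rw [he] at hc; simp at hc
    · rw [he] at hc; simp at hc
      refine ⟨d :: ds, ?_, ?_⟩
      · rw [List.mapM_cons, he, hds]; rfl
      · intro x hx; rcases List.mem_cons.mp hx with h' | h'
        · subst h'; omega
        · exact hb x h'

lemma pyDigits_some (num : Int) (h : 0 ≤ num) :
    ∃ ds, pyDigits num = some ds ∧ ∀ d ∈ ds, 0 ≤ d ∧ d ≤ 9 :=
  mapM_digits _ (toChars_ok num h)

-- ----- bLast characterisation -----

lemma enumerate_snoc (ds : List Int) (x : Int) (s : Int) :
    PySem.List.enumerate (ds ++ [x]) s = PySem.List.enumerate ds s ++ [(s + ds.length, x)] := by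
  rw [PySem.List.enumerate_append]; simp [PySem.List.enumerate_cons, PySem.List.enumerate_nil]

lemma bLast_append (ds : List Int) (x : Int) :
    bLast (ds ++ [x]) = PySem.List.pySetD (bLast ds) x (ds.length : Int) := by
  rw [bLast, enumerate_snoc, List.foldl_append]; simp [bLast]

lemma bLast_length (ds : List Int) : (bLast ds).length = 10 := by
  induction ds using List.reverseRecOn with
  | nil => simp [bLast, PySem.List.enumerate_nil]
  | append_singleton ds x ih => rw [bLast_append, PySem.List.length_pySetD, ih]

lemma bLast_spec (ds : List Int) (hb : ∀ d ∈ ds, 0 ≤ d ∧ d ≤ 9) (c : Nat) (hc : c < 10) :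
    ((bLast ds).getD c (-1) = -1 ∧ ∀ j, j < ds.length → ds.getD j 0 ≠ (c : Int))
  ∨ (∃ j, j < ds.length ∧ (bLast ds).getD c (-1) = (j : Int) ∧ ds.getD j 0 = (c : Int) ∧
      ∀ j', j < j' → j' < ds.length → ds.getD j' 0 ≠ (c : Int)) := by
  induction ds using List.reverseRecOn with
  | nil =>
    left
    constructor
    · simp only [bLast, PySem.List.enumerate_nil, List.foldl_nil]
      interval_cases c <;> rfl
    · intro j hj; simp at hj
  | append_singleton ds x ih =>
    have hx : 0 ≤ x ∧ x ≤ 9 := hb x (by simp)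
    have hb' : ∀ d ∈ ds, 0 ≤ d ∧ d ≤ 9 := fun d hd => hb d (by simp [hd])
    have hset : bLast (ds ++ [x]) = (bLast ds).set x.toNat (ds.length : Int) := by
      rw [bLast_append, PySem.List.pySetD_of_nonneg _ _ hx.1]
    have hxlt : x.toNat < (bLast ds).length := by rw [bLast_length]; omega
    have hgetj : ∀ j, j < ds.length → (ds ++ [x]).getD j 0 = ds.getD j 0 := by
      intro j hj
      simp [List.getD, List.getElem?_append_left hj]
    have hgetn : (ds ++ [x]).getD ds.length 0 = x := by
      simp [List.getD]
    by_cases hcx : c = x.toNat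
    · right
      refine ⟨ds.length, by simp, ?_, ?_, ?_⟩
      · rw [hset, hcx, List.getD, List.getElem?_set_self (by omega)]; simp
      · rw [hgetn, hcx]; omega
      · intro j' hj' hj''; simp at hj''; omega
    · have hne : ((bLast ds).set x.toNat (ds.length : Int)).getD c (-1) = (bLast ds).getD c (-1) := by
        simp [List.getD, List.getElem?_set_ne (by omega : x.toNat ≠ c)]
      have hxc : x ≠ (c : Int) := by omega
      rcases ih hb' with ⟨h1, h2⟩ | ⟨j, hj, h1, h2, h3⟩
      · left
        refine ⟨by rw [hset, hne, h1], ?_⟩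
        intro j hj
        rcases Nat.lt_succ_iff_lt_or_eq.mp (by simpa using hj) with h | h
        · rw [hgetj j h]; exact h2 j h
        · subst h; rw [hgetn]; exact hxc
      · right
        refine ⟨j, by simp; omega, by rw [hset, hne, h1], by rw [hgetj j hj]; exact h2, ?_⟩
        intro j' hj' hj''
        rcases Nat.lt_succ_iff_lt_or_eq.mp (by simpa using hj'') with h | h
        · rw [hgetj j' h]; exact h3 j' hj' h
        · subst h; rw [hgetn]; exact hxc

lemma bLast_gt_elim (ds : List Int) (hb : ∀ d ∈ ds, 0 ≤ d ∧ d ≤ 9) (c : Nat) (hc : c < 10)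
    (i : Nat) (h : (bLast ds).getD c (-1) > (i : Int)) :
    ∃ j, i < j ∧ j < ds.length ∧ ds.getD j 0 = (c : Int) := by
  rcases bLast_spec ds hb c hc with ⟨h1, _⟩ | ⟨j, hj, h1, h2, _⟩
  · rw [h1] at h; omega
  · exact ⟨j, by rw [h1] at h; omega, hj, h2⟩

lemma bLast_last (ds : List Int) (hb : ∀ d ∈ ds, 0 ≤ d ∧ d ≤ 9) (c : Nat) (hc : c < 10)
    (j : Nat) (hj : j < ds.length) (hocc : ds.getD j 0 = (c : Int))
    (hlast : ∀ j', j < j' → j' < ds.length → ds.getD j' 0 ≠ (c : Int)) :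
    (bLast ds).getD c (-1) = (j : Int) := by
  rcases bLast_spec ds hb c hc with ⟨_, h2⟩ | ⟨j0, hj0, h1, h2, h3⟩
  · exact absurd hocc (h2 j hj)
  · rcases Nat.lt_trichotomy j j0 with h | h | h
    · exact absurd h2 (hlast j0 h hj0)
    · rw [h1, h]
    · exact absurd hocc (h3 j h hj)

-- ----- intro rules for B's loops -----

lemma bInner_eq_none (last : List Int) (d : Int) (i : Nat) (C : Nat)
    (h : ∀ c : Nat, c ≤ C → d < (c : Int) → last.getD c (-1) ≤ (i : Int)) :
    bInner last d i C = none := by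
  induction C with
  | zero => rfl
  | succ c ih =>
    rw [bInner]
    split
    · rfl
    · rename_i hlt
      rw [if_neg (by push_neg; exact h (c+1) le_rfl (by push_cast; omega))]
      exact ih (fun c' hc' hd => h c' (by omega) hd)

lemma bInner_eq_some (last : List Int) (d : Int) (i : Nat) (C : Nat) (c : Nat)
    (hd : 0 ≤ d) (h1 : d < (c : Int)) (h2 : c ≤ C) (h3 : last.getD c (-1) > (i : Int))
    (h4 : ∀ c' : Nat, c < c' → c' ≤ C → last.getD c' (-1) ≤ (i : Int)) :
    bInner last d i C = some c := by
  induction C with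
  | zero => exfalso; omega
  | succ C ih =>
    rw [bInner]
    by_cases hcC : c = C + 1
    · subst hcC
      rw [if_neg (by push_cast; omega), if_pos (by push_cast at h3 ⊢; omega)]
    · have hcC' : c ≤ C := by omega
      rw [if_neg (by push_cast; omega)]
      rw [if_neg (by push_neg; exact h4 (C+1) (by omega) le_rfl)]
      exact ih hcC' (fun c' h h' => h4 c' h (by omega))

lemma bScan_eq_none (ds last : List Int) (i0 : Nat)
    (h : ∀ i, i0 ≤ i → i < ds.length → bInner last (ds.getD i 0) i 9 = none) :
    bScan ds last i0 = none := by
  by_cases hlt : i0 < ds.length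
  · rw [bScan, if_pos hlt, h i0 le_rfl hlt]
    exact bScan_eq_none ds last (i0+1) (fun i hi hi' => h i (by omega) hi')
  · rw [bScan, if_neg hlt]
termination_by ds.length - i0

lemma bScan_eq_some (ds last : List Int) (i0 i : Nat) (c : Nat)
    (h0 : i0 ≤ i) (h1 : i < ds.length) (h2 : bInner last (ds.getD i 0) i 9 = some c)
    (h3 : ∀ i', i0 ≤ i' → i' < i → bInner last (ds.getD i' 0) i' 9 = none) :
    bScan ds last i0 = some (i, c) := by
  by_cases he : i0 = i
  · subst he; rw [bScan, if_pos h1, h2]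
  · rw [bScan, if_pos (by omega), h3 i0 le_rfl (by omega)]
    exact bScan_eq_some ds last (i0+1) i c (by omega) h1 h2 (fun i' hi hi' => h3 i' (by omega) hi')
termination_by ds.length - i0

-- ----- elimination rules for A's loops -----

lemma aFindInc_cases (ds : List Int) (i0 : Nat) :
    (aFindInc ds i0 = -1 ∧ ∀ i, i0 ≤ i → i < ds.length → ds.getD i 0 ≤ ds.getD (i-1) 0)
  ∨ (∃ k : Nat, aFindInc ds i0 = (k : Int) ∧ i0 ≤ k ∧ k < ds.length ∧
      ds.getD (k-1) 0 < ds.getD k 0 ∧ ∀ i, i0 ≤ i → i < k → ds.getD i 0 ≤ ds.getD (i-1) 0) := by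
  by_cases hlt : i0 < ds.length
  · by_cases hasc : ds.getD i0 0 > ds.getD (i0-1) 0
    · right
      exact ⟨i0, by rw [aFindInc, if_pos hlt, if_pos hasc], le_rfl, hlt, hasc, by omega⟩
    · have heq : aFindInc ds i0 = aFindInc ds (i0+1) := by rw [aFindInc, if_pos hlt, if_neg hasc]
      rcases aFindInc_cases ds (i0+1) with ⟨h1, h2⟩ | ⟨k, h1, h2, h3, h4, h5⟩
      · left
        refine ⟨heq ▸ h1, fun i hi hi' => ?_⟩
        rcases Nat.eq_or_lt_of_le hi with he | hlt'
        · subst he; omega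
        · exact h2 i (by omega) hi'
      · right
        refine ⟨k, heq ▸ h1, by omega, h3, h4, fun i hi hi' => ?_⟩
        rcases Nat.eq_or_lt_of_le hi with he | hlt'
        · subst he; omega
        · exact h5 i (by omega) hi'
  · left
    exact ⟨by rw [aFindInc, if_neg hlt], fun i hi hi' => by omega⟩
termination_by ds.length - i0

lemma aMaxScan_spec (ds : List Int) : ∀ (i0 : Nat) (mv : Int) (mi : Nat),
    mi ≤ i0 → mi < ds.length → ds.getD mi 0 = mv →
    mv ≤ (aMaxScan ds i0 mv mi).1 ∧ mi ≤ (aMaxScan ds i0 mv mi).2 ∧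
    (aMaxScan ds i0 mv mi).2 < ds.length ∧
    ds.getD (aMaxScan ds i0 mv mi).2 0 = (aMaxScan ds i0 mv mi).1 ∧
    (∀ i, i0 ≤ i → i < ds.length → ds.getD i 0 ≤ (aMaxScan ds i0 mv mi).1) ∧
    (∀ i, i0 ≤ i → i < ds.length → (aMaxScan ds i0 mv mi).2 < i →
      ds.getD i 0 < (aMaxScan ds i0 mv mi).1) := by
  intro i0
  induction' hn : ds.length - i0 with m ih generalizing i0
  case zero =>
    intro mv mi hmi0 hmi hval
    have hge : ¬ i0 < ds.length := by omega
    rw [aMaxScan, if_neg hge]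
    exact ⟨le_rfl, le_rfl, hmi, hval, fun i h1 h2 => by omega, fun i h1 h2 => by omega⟩
  case succ =>
    intro mv mi hmi0 hmi hval
    have hlt : i0 < ds.length := by omega
    by_cases hge : ds.getD i0 0 ≥ mv
    · have heq : aMaxScan ds i0 mv mi = aMaxScan ds (i0+1) (ds.getD i0 0) i0 := by
        rw [aMaxScan, if_pos hlt, if_pos hge]
      obtain ⟨p1, p2, p3, p4, p5, p6⟩ := ih (i0+1) (by omega) (ds.getD i0 0) i0 (by omega) hlt rfl
      rw [heq]
      refine ⟨le_trans hge p1, le_trans hmi0 (le_trans (by omega) p2), p3, p4, ?_, ?_⟩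
      · intro i h1 h2
        rcases Nat.eq_or_lt_of_le h1 with he | h
        · subst he; exact p1
        · exact p5 i (by omega) h2
      · intro i h1 h2 h3
        rcases Nat.eq_or_lt_of_le h1 with he | h
        · omega
        · exact p6 i (by omega) h2 h3
    · have heq : aMaxScan ds i0 mv mi = aMaxScan ds (i0+1) mv mi := by
        rw [aMaxScan, if_pos hlt, if_neg hge]
      obtain ⟨p1, p2, p3, p4, p5, p6⟩ := ih (i0+1) (by omega) mv mi (by omega) hmi hval
      rw [heq]
      refine ⟨p1, p2, p3, p4, ?_, ?_⟩
      · intro i h1 h2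
        rcases Nat.eq_or_lt_of_le h1 with he | h
        · subst he; omega
        · exact p5 i (by omega) h2
      · intro i h1 h2 h3
        rcases Nat.eq_or_lt_of_le h1 with he | h
        · subst he; omega
        · exact p6 i (by omega) h2 h3

lemma aPrefix_finds (ds : List Int) (inc : Nat) (mv : Int) (mi : Nat) :
    ∀ (i0 : Nat), (∃ i, i0 ≤ i ∧ i < inc ∧ ds.getD i 0 < mv) →
    ∃ i, aPrefix ds inc mv mi i0 = some (aSwap ds mi i) ∧ i0 ≤ i ∧ i < inc ∧
      ds.getD i 0 < mv ∧ ∀ i', i0 ≤ i' → i' < i → mv ≤ ds.getD i' 0 := by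
  intro i0
  induction' hn : inc - i0 with m ih generalizing i0
  case zero => rintro ⟨i, h1, h2, h3⟩; omega
  case succ =>
    rintro ⟨i, h1, h2, h3⟩
    have hlt : i0 < inc := by omega
    by_cases hless : ds.getD i0 0 < mv
    · exact ⟨i0, by rw [aPrefix, if_pos hlt, if_pos hless], le_rfl, hlt, hless, by omega⟩
    · have heq : aPrefix ds inc mv mi i0 = aPrefix ds inc mv mi (i0+1) := by
        rw [aPrefix, if_pos hlt, if_neg hless]
      have hi : i0 ≠ i := fun he => hless (he ▸ h3)
      obtain ⟨i', q1, q2, q3, q4, q5⟩ := ih (i0+1) (by omega) ⟨i, by omega, h2, h3⟩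
      refine ⟨i', heq ▸ q1, by omega, q3, q4, fun i'' hle hlt' => ?_⟩
      rcases Nat.eq_or_lt_of_le hle with he | h
      · subst he; omega
      · exact q5 i'' (by omega) hlt'

-- ----- glue -----

lemma antitone_prefix (ds : List Int) (k : Nat)
    (h : ∀ i, 1 ≤ i → i < k → ds.getD i 0 ≤ ds.getD (i-1) 0) :
    ∀ i j, i ≤ j → j < k → ds.getD j 0 ≤ ds.getD i 0 := by
  intro i j hij hjk
  induction j with
  | zero => have : i = 0 := by omega
            simp [this]
  | succ j ih =>
    rcases Nat.eq_or_lt_of_le hij with he | hlt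
    · simp [he]
    · calc ds.getD (j+1) 0 ≤ ds.getD j 0 := by
            have := h (j+1) (by omega) hjk
            simpa using this
        _ ≤ ds.getD i 0 := ih (by omega) (by omega)

lemma swap_eq (ds : List Int) (i mi : Nat) (hne : i ≠ mi) :
    aSwap ds mi i = bSwap ds i mi := by
  simp only [aSwap, bSwap]
  exact List.set_comm _ _ (fun h => hne h.symm)

lemma getD_mem (ds : List Int) (j : Nat) (hj : j < ds.length) : ds.getD j 0 ∈ ds := by
  rw [List.getD_eq_getElem ds 0 hj]
  exact List.getElem_mem hj

-- ===== VERDICT (by name: the statement is the Claim_ definition above) =====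
theorem solution_spec : Claim_equal_solution := by
  unfold Claim_equal_solution Spec_solution
  intro num _ hpre
  obtain ⟨ds, hds, hb⟩ := pyDigits_some num hpre
  rcases aFindInc_cases ds 1 with ⟨h1, hmono⟩ | ⟨k, hkeq, hk1, hkn, hasc, hpref⟩
  · -- no ascent: both return num
    have hmono' := antitone_prefix ds ds.length hmono
    have hBnone : bScan ds (bLast ds) 0 = none := by
      apply bScan_eq_none
      intro i _ hin
      apply bInner_eq_none
      intro c _ hgt
      by_contra hcon
      push_neg at hcon
      obtain ⟨j, hij, hjn, hj⟩ := bLast_gt_elim ds hb c (by omega) i (by omega)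
      have := hmono' i j (by omega) hjn
      omega
    simp [solution, solution_alt, hds, h1, hBnone]
  · -- ascent at k
    have hpa := antitone_prefix ds k hpref
    obtain ⟨p1, p2, p3, p4, p5, p6⟩ :=
      aMaxScan_spec ds (k+1) (ds.getD k 0) k (by omega) hkn rfl
    set mm := aMaxScan ds (k+1) (ds.getD k 0) k with hmm
    have hsuffle : ∀ i, k ≤ i → i < ds.length → ds.getD i 0 ≤ mm.1 := by
      intro i hi hin
      rcases Nat.eq_or_lt_of_le hi with he | h
      · subst he; exact p1
      · exact p5 i (by omega) hin
    have hsufflt : ∀ i, mm.2 < i → i < ds.length → ds.getD i 0 < mm.1 := by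
      intro i hi hin
      exact p6 i (by omega) hin hi
    have hMVb : 0 ≤ mm.1 ∧ mm.1 ≤ 9 := p4 ▸ hb _ (getD_mem ds mm.2 p3)
    have hex : ∃ i, 0 ≤ i ∧ i < k ∧ ds.getD i 0 < mm.1 := by
      refine ⟨k-1, by omega, by omega, ?_⟩
      have := hsuffle k le_rfl hkn
      omega
    obtain ⟨i0, hApfx, _, hilt, hival, hfirst⟩ := aPrefix_finds ds k mm.1 mm.2 0 hex
    have hcast : ((mm.1.toNat : Nat) : Int) = mm.1 := Int.toNat_of_nonneg hMVb.1
    have hlastMV : (bLast ds).getD mm.1.toNat (-1) = (mm.2 : Int) := by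
      apply bLast_last ds hb mm.1.toNat (by omega) mm.2 p3 (by rw [hcast]; exact p4)
      intro j' hj' hj''
      rw [hcast]
      exact ne_of_lt (hsufflt j' hj' hj'')
    have hbinner : bInner (bLast ds) (ds.getD i0 0) i0 9 = some mm.1.toNat := by
      apply bInner_eq_some
      · exact (hb _ (getD_mem ds i0 (by omega))).1
      · omega
      · omega
      · rw [hlastMV]; omega
      · intro c' hgt hle
        by_contra hcon
        push_neg at hcon
        obtain ⟨j, hij, hjn, hj⟩ := bLast_gt_elim ds hb c' (by omega) i0 (by omega)
        by_cases hjk : j < k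
        · have := hpa i0 j (by omega) hjk
          omega
        · have := hsuffle j (by omega) hjn
          omega
    have hnone : ∀ i', 0 ≤ i' → i' < i0 → bInner (bLast ds) (ds.getD i' 0) i' 9 = none := by
      intro i' _ hi'
      apply bInner_eq_none
      intro c _ hgt
      by_contra hcon
      push_neg at hcon
      obtain ⟨j, hij, hjn, hj⟩ := bLast_gt_elim ds hb c (by omega) i' (by omega)
      have hMVle := hfirst i' (by omega) hi'
      by_cases hjk : j < k
      · have := hpa i' j (by omega) hjk
        omega
      · have := hsuffle j (by omega) hjn
        omega
    have hBsome : bScan ds (bLast ds) 0 = some (i0, mm.1.toNat) :=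
      bScan_eq_some ds (bLast ds) 0 i0 mm.1.toNat (by omega) (by omega) hbinner hnone
    have hknat : ((k : Int)).toNat = k := Int.toNat_natCast k
    have hne : (k : Int) ≠ -1 := by omega
    simp only [solution, solution_alt, hds, hkeq, hne, if_false, hknat, ← hmm,
      hApfx, hBsome, hlastMV, Int.toNat_natCast]
    rw [swap_eq ds i0 mm.2 (by omega)]
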